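-- pv_equiv track=rewrite | github.com/ooici/ioncore-python | ion/services/dm/ingestion/cdm_variable_methods.py | _flatten_index
-- ===== SOURCE A (Python) =====
-- def _flatten_index(indices, shape):
--     """
--     Uses the given indices representing a position in a multidimensional context to determine the
--     equivalent position in a flattened 1D array representation of that same nD context.  The
--     cardinality (also size) of each dimension in multidimensional space is given by "shape".
--     Note: This means that both "indices" and "shape" must be lists with the same rank (aka length.)
--     """
--     assert(isinstance(indices, list))
--     assert(isinstance(shape, list))
--     assert(len(indices) == len(shape))
--
--     result = 0
--     for i in range(len(indices)):
--         offset = 1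
--         for j in range(i+1, len(shape)):
--             offset *= shape[j]
--         result += indices[i] * offset
--
--     return result
-- ===== SOURCE B (Python) =====
-- def _flatten_index(indices, shape):
--     """Row-major flatten by Horner's rule: one pass, no inner product loop."""
--     assert(isinstance(indices, list))
--     assert(isinstance(shape, list))
--     assert(len(indices) == len(shape))
--     result = 0
--     for idx, size in zip(indices, shape):
--         result = result * size + idx
--     return result
-- ===== Notes on version B (the rewrite author's own statement) =====
-- stated objective: faster
-- what changed: Replaces the nested loop (recomputing the suffix product of shape for every dimension) with a single Horner-rule pass result = result*size + idx over zip(indices, shape).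
import Mathlib
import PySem

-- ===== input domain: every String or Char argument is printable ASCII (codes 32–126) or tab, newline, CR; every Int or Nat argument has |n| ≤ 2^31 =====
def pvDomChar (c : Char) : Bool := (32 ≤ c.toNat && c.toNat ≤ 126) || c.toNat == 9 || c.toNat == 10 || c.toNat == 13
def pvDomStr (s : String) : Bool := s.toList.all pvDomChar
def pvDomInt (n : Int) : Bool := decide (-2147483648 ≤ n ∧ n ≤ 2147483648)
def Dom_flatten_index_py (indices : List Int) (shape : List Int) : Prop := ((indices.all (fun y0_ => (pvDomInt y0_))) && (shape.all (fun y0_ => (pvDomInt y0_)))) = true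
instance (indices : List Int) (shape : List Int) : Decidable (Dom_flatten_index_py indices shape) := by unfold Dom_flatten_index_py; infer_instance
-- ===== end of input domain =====

-- B replaces A's nested loop (a fresh suffix product of shape per dimension, O(n^2)) with one
-- Horner-rule pass over zip(indices, shape) (O(n)).

-- ===== PORT A =====
-- literal port: for i in range(len(indices)): offset = Π_{j=i+1}^{len-1} shape[j]; result += indices[i]*offset
def flatten_index_py (indices : List Int) (shape : List Int) : Int :=
  (PySem.List.pyRange 0 indices.length 1).foldl
    (fun result i =>
      result + PySem.List.pyGetD indices i 0 *
        ((PySem.List.pyRange (i + 1) shape.length 1).foldl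
          (fun offset j => offset * PySem.List.pyGetD shape j 0) 1)) 0

-- ===== PORT B =====
-- literal port of Source B: Horner's rule over zip(indices, shape)
def flatten_index_py_alt (indices : List Int) (shape : List Int) : Int :=
  (indices.zip shape).foldl (fun result p => result * p.2 + p.1) 0

-- ===== PRECONDITION & SPEC =====
-- Pre_: A's assert requires the two lists to have the same length (AssertionError otherwise).
def Pre_flatten_index_py (indices : List Int) (shape : List Int) : Prop :=
  indices.length = shape.length
instance (indices : List Int) (shape : List Int) : Decidable (Pre_flatten_index_py indices shape) := by unfold Pre_flatten_index_py; infer_instance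

def pvWitness_flatten_index_py : List Int × List Int := ([1, 2, 0], [3, 4, 5])

def Spec_flatten_index_py (indices : List Int) (shape : List Int) (out : Int) : Prop := out = flatten_index_py_alt indices shape
instance (indices : List Int) (shape : List Int) (out : Int) : Decidable (Spec_flatten_index_py indices shape out) := by unfold Spec_flatten_index_py; infer_instance

-- ===== CLAIM (what is proved, stated in full; the proofs are below) =====
def Claim_equal_flatten_index_py : Prop := ∀ (indices : List Int) (shape : List Int), Dom_flatten_index_py indices shape → Pre_flatten_index_py indices shape → Spec_flatten_index_py indices shape (flatten_index_py indices shape)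

-- ===== LEMMAS AND PROOFS =====

-- reference value: Σ_i indices[i] * Π_{j>i} shape[j], by aligned structural recursion
def pvS : List Int → List Int → Int
  | x :: ind, _ :: sh => x * sh.prod + pvS ind sh
  | _, _ => 0

-- A's outer loop, rephrased over enumerate, with start offset k, accumulates pvS of the suffix
theorem pvA_aux (shape : List Int) :
    ∀ (ind : List Int) (k : Nat) (r : Int), (shape.drop k).length = ind.length →
    (PySem.List.enumerate ind (k : Int)).foldl
      (fun result p =>
        result + p.2 *
          ((PySem.List.pyRange (p.1 + 1) shape.length 1).foldl
            (fun offset j => offset * PySem.List.pyGetD shape j 0) 1)) r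
    = r + pvS ind (shape.drop k) := by
  intro ind
  induction ind with
  | nil =>
      intro k r _
      simp [PySem.List.enumerate_nil, pvS]
  | cons x ind ih =>
      intro k r h
      have hk : k < shape.length := by
        have h2 := h; simp [List.length_drop] at h2; omega
      have hdrop : shape.drop k = shape[k] :: shape.drop (k + 1) :=
        List.drop_eq_getElem_cons hk
      have hinner :
          (PySem.List.pyRange ((k : Int) + 1) shape.length 1).foldl
            (fun offset j => offset * PySem.List.pyGetD shape j 0) 1
          = (shape.drop (k + 1)).prod := by
        have h0 : (0 : Int) ≤ (k : Int) + 1 := by positivity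
        rw [PySem.List.foldl_pyRange_pyGetD' shape 0
          (fun offset x => offset * x) 1 h0]
        have ht : ((k : Int) + 1).toNat = k + 1 := by omega
        rw [ht, List.prod_eq_foldl]
      rw [PySem.List.enumerate_cons, List.foldl_cons]
      have hlen : (shape.drop (k + 1)).length = ind.length := by
        simp [List.length_drop] at h ⊢; omega
      have hcast : (k : Int) + 1 = ((k + 1 : Nat) : Int) := by push_cast; ring
      rw [hcast] at hinner ⊢
      rw [ih (k + 1) _ hlen, hinner, hdrop]
      simp [pvS]; ring

theorem pvA_eq (ind sh : List Int) (h : ind.length = sh.length) :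
    flatten_index_py ind sh = pvS ind sh := by
  unfold flatten_index_py
  have hrw := PySem.List.enumerate_eq_map_pyRange ind 0
  have : (PySem.List.pyRange 0 ind.length 1).foldl
      (fun result i =>
        result + PySem.List.pyGetD ind i 0 *
          ((PySem.List.pyRange (i + 1) sh.length 1).foldl
            (fun offset j => offset * PySem.List.pyGetD sh j 0) 1)) 0
      = (PySem.List.enumerate ind (0 : Int)).foldl
      (fun result p =>
        result + p.2 *
          ((PySem.List.pyRange (p.1 + 1) sh.length 1).foldl
            (fun offset j => offset * PySem.List.pyGetD sh j 0) 1)) 0 := by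
    rw [hrw, List.foldl_map]
    simp
  have haux := pvA_aux sh ind 0 0 (by simpa using h.symm)
  simp only [Nat.cast_zero] at haux
  rw [this, haux]
  simp

theorem pvB_aux : ∀ (ind sh : List Int) (a : Int), ind.length = sh.length →
    (ind.zip sh).foldl (fun result p => result * p.2 + p.1) a = a * sh.prod + pvS ind sh := by
  intro ind
  induction ind with
  | nil => intro sh a h
           have : sh = [] := List.eq_nil_of_length_eq_zero (by simpa using h.symm)
           simp [this, pvS]
  | cons x ind ih =>
      intro sh a h
      cases sh with
      | nil => simp at h
      | cons s sh =>
          rw [List.zip_cons_cons, List.foldl_cons, ih sh (a * s + x) (by simpa using h)]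
          simp [pvS]; ring

theorem pvB_eq (ind sh : List Int) (h : ind.length = sh.length) :
    flatten_index_py_alt ind sh = pvS ind sh := by
  unfold flatten_index_py_alt
  rw [pvB_aux ind sh 0 h]; ring

-- ===== VERDICT (by name: the statement is the Claim_ definition above) =====
theorem flatten_index_py_spec : Claim_equal_flatten_index_py := by
  intro ind sh _ hpre
  unfold Spec_flatten_index_py
  rw [pvA_eq ind sh hpre, pvB_eq ind sh hpre]
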